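-- pv_equiv track=rewrite | github.com/gaespino/Automation | S2T/BASELINE_DMR/S2T/product_specific/cwf/functions.py | pseudo_masking
-- ===== SOURCE A (Python) =====
-- def pseudo_masking(ClassMask: dict, ClassMask_sys: dict, syscomputes: int):
--
-- 	for key in ClassMask.keys():
--
-- 		ClassMask_fix = ClassMask[key][::-1]
-- 		computes = {'compute0':ClassMask_fix[0:24][::-1],'compute1':ClassMask_fix[24:48][::-1],'compute2':ClassMask_fix[48:72][::-1]}
--
-- 		for compute in syscomputes:
-- 			bitcount = 0
-- 			bitarray = []
-- 			for bit in computes[compute]: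
-- 				addbits = bitcount % 3 # there are 5 disabled after a set of 3 cores
-- 				# if addbits == 0 and bitcount != 0:
-- 				if bitcount == 0:
-- 					bitarray.append('11') # 5 cores are disabled starting at the core 0
-- 				elif addbits == 0:
-- 					bitarray.append('1111')
-- 				bitarray.append(bit)
-- 				bitcount += 1
-- 			bitarray.append('111111')
-- 			bitstring = ''.join(bitarray)
-- 			ClassMask_sys[key][compute] = bitstring
--
-- 	return ClassMask_sys
-- ===== SOURCE B (Python) =====
-- def _chunks3(s):
--     return [s[:3]] + _chunks3(s[3:]) if s else []
--
-- def _mask_string(s):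
--     if not s:
--         return '111111'
--     return '11' + '1111'.join(_chunks3(s)) + '111111'
--
-- def pseudo_masking(ClassMask: dict, ClassMask_sys: dict, syscomputes: int):
--     for key in ClassMask:
--         s = ClassMask[key]
--         n = len(s)
--         masks = {'compute%d' % i:
--                  _mask_string(s[max(0, n - 24 * (i + 1)):max(0, n - 24 * i)])
--                  for i in range(3)}
--         if syscomputes:
--             inner = ClassMask_sys[key]
--             for compute in syscomputes:
--                 inner[compute] = masks[compute]
--     return ClassMask_sys
-- ===== Notes on version B (the rewrite author's own statement) =====
-- stated objective: simpler
-- what changed: A's per-bit accumulator loop with a bitcount-mod-3 state machine is replaced by a closed-form mask ('11' + '1111'.join(fixed groups of 3) + '111111', empty segment giving '111111'); each compute's segment is sliced directly out of the original string by arithmetic instead of A's reverse-slice-reverse dance; and each key's inner dict is built once and written once instead of one outer write per compute. Both A and B mutate ClassMask_sys in place; the equivalence is about the returned value.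
import Mathlib
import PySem

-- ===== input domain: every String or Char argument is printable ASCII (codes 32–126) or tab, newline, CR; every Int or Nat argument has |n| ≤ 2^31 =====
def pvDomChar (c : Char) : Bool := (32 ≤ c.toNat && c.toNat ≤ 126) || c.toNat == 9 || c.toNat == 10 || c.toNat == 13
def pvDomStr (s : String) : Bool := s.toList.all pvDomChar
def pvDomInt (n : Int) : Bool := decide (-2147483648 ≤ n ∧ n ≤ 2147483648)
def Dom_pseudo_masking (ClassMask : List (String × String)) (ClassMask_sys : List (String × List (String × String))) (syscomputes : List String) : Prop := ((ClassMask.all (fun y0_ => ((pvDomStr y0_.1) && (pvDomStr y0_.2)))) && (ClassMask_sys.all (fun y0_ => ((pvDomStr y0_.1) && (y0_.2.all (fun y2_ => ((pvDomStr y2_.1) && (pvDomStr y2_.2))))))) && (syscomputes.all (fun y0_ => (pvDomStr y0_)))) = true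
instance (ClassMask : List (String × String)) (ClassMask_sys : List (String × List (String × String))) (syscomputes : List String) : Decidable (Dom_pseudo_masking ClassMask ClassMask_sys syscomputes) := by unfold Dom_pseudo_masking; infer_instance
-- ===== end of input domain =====

-- B replaces A's per-bit bitcount%3 accumulator loop by a closed-form '11' + '1111'.join(groups of 3) + '111111'
-- construction, slices each compute's segment directly out of the original string (no double reversal), and writes
-- each key's inner dict once instead of once per compute (simpler); both Pythons mutate ClassMask_sys in place
-- identically — the equivalence proved here is about the returned value.

-- ===== PORT A =====
-- ClassMask_sys[key][compute] = bitstring, as a value: overwrite-in-place insert into the inner dict, then into the outer one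
def pmSet (cms : List (String × List (String × String))) (key compute bs : String) : List (String × List (String × String)) :=
  ((PySem.Dict.mk cms).insert key
    (((PySem.Dict.mk ((PySem.Dict.mk cms).getD key [])).insert compute bs).items)).items

-- the inner per-bit loop of A: bitcount/bitarray accumulator, then ''.join
def bitsA (cs : List Char) : String :=
  let st := cs.foldl (fun (acc : Nat × List (List Char)) bit =>
      let addbits := acc.1 % 3
      let arr := if acc.1 = 0 then acc.2 ++ [['1','1']]
                 else if addbits = 0 then acc.2 ++ [['1','1','1','1']]
                 else acc.2
      (acc.1 + 1, arr ++ [[bit]])) (0, ([] : List (List Char)))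
  String.ofList ((st.2 ++ [['1','1','1','1','1','1']]).flatten)

def pseudo_masking (ClassMask : List (String × String)) (ClassMask_sys : List (String × List (String × String))) (syscomputes : List String) : List (String × List (String × String)) :=
  (PySem.Dict.mk ClassMask).keys.foldl (fun cms key =>
    let fix := ((PySem.Dict.mk ClassMask).getD key "").toList.reverse
    let computes : PySem.Dict String (List Char) := PySem.Dict.mk
      [("compute0", (PySem.List.slice fix (some 0) (some 24)).reverse),
       ("compute1", (PySem.List.slice fix (some 24) (some 48)).reverse),
       ("compute2", (PySem.List.slice fix (some 48) (some 72)).reverse)]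
    syscomputes.foldl (fun cms compute =>
      pmSet cms key compute (bitsA (computes.getD compute []))) cms) ClassMask_sys

-- ===== PORT B =====
-- _chunks3: [s[:3]] + _chunks3(s[3:]) if s else []
def chunks3 : List Char → List (List Char)
  | [] => []
  | c :: cs => (c :: cs).take 3 :: chunks3 ((c :: cs).drop 3)
termination_by l => l.length
decreasing_by simp

-- _mask_string
def maskString (cs : List Char) : String :=
  if cs = [] then "111111"
  else String.ofList (['1','1'] ++ List.intercalate ['1','1','1','1'] (chunks3 cs) ++ ['1','1','1','1','1','1'])

-- s[max(0, n - 24*(i+1)) : max(0, n - 24*i)]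
def segB (s : List Char) (i : Int) : List Char :=
  let n : Int := s.length
  PySem.List.slice s (some (max 0 (n - 24 * (i + 1)))) (some (max 0 (n - 24 * i)))

def pseudo_masking_alt (ClassMask : List (String × String)) (ClassMask_sys : List (String × List (String × String))) (syscomputes : List String) : List (String × List (String × String)) :=
  (PySem.Dict.mk ClassMask).keys.foldl (fun cms key =>
    let s := ((PySem.Dict.mk ClassMask).getD key "").toList
    let masks : PySem.Dict String String := PySem.Dict.mk
      ((PySem.List.pyRange 0 3 1).map (fun i => ("compute" ++ PySem.Int.toStr i, maskString (segB s i))))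
    if syscomputes = [] then cms
    else
      let inner := syscomputes.foldl (fun d c => d.insert c (masks.getD c ""))
        (PySem.Dict.mk ((PySem.Dict.mk cms).getD key []))
      ((PySem.Dict.mk cms).insert key inner.items).items) ClassMask_sys

-- ===== PRECONDITION & SPEC =====
-- Pre_ excludes exactly the inputs where Python A raises a KeyError: with a nonempty ClassMask and a
-- nonempty syscomputes, every compute name must be one of compute0/1/2 and every ClassMask key must
-- be a key of ClassMask_sys.
def Pre_pseudo_masking (ClassMask : List (String × String)) (ClassMask_sys : List (String × List (String × String))) (syscomputes : List String) : Prop :=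
  ClassMask = [] ∨ syscomputes = [] ∨
  ((∀ c ∈ syscomputes, c = "compute0" ∨ c = "compute1" ∨ c = "compute2") ∧
   (∀ p ∈ ClassMask, (PySem.Dict.mk ClassMask_sys).contains p.1 = true))
instance (ClassMask : List (String × String)) (ClassMask_sys : List (String × List (String × String))) (syscomputes : List String) : Decidable (Pre_pseudo_masking ClassMask ClassMask_sys syscomputes) := by unfold Pre_pseudo_masking; infer_instance

def pvWitness_pseudo_masking : (List (String × String)) × (List (String × List (String × String))) × List String :=
  ([("a", "0100101")], [("a", [])], ["compute0", "compute2"])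

def Spec_pseudo_masking (ClassMask : List (String × String)) (ClassMask_sys : List (String × List (String × String))) (syscomputes : List String) (out : List (String × List (String × String))) : Prop := out = pseudo_masking_alt ClassMask ClassMask_sys syscomputes
instance (ClassMask : List (String × String)) (ClassMask_sys : List (String × List (String × String))) (syscomputes : List String) (out : List (String × List (String × String))) : Decidable (Spec_pseudo_masking ClassMask ClassMask_sys syscomputes out) := by unfold Spec_pseudo_masking; infer_instance

-- ===== CLAIM (what is proved, stated in full; the proofs are below) =====
def Claim_equal_pseudo_masking : Prop := ∀ (ClassMask : List (String × String)) (ClassMask_sys : List (String × List (String × String))) (syscomputes : List String), Dom_pseudo_masking ClassMask ClassMask_sys syscomputes → Pre_pseudo_masking ClassMask ClassMask_sys syscomputes → Spec_pseudo_masking ClassMask ClassMask_sys syscomputes (pseudo_masking ClassMask ClassMask_sys syscomputes)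

-- ===== LEMMAS AND PROOFS =====

-- the material A's inner loop appends for bits cs starting at bitcount n
def emitA : List Char → Nat → List (List Char)
  | [], _ => []
  | b :: cs, n =>
      (if n = 0 then [['1','1']] else if n % 3 = 0 then [['1','1','1','1']] else []) ++
      [[b]] ++ emitA cs (n + 1)

lemma foldA_eq (cs : List Char) : ∀ (n : Nat) (arr : List (List Char)),
    cs.foldl (fun (acc : Nat × List (List Char)) bit =>
      let addbits := acc.1 % 3
      let arr := if acc.1 = 0 then acc.2 ++ [['1','1']]
                 else if addbits = 0 then acc.2 ++ [['1','1','1','1']]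
                 else acc.2
      (acc.1 + 1, arr ++ [[bit]])) (n, arr)
    = (n + cs.length, arr ++ emitA cs n) := by
  induction cs with
  | nil => intro n arr; simp [emitA]
  | cons b cs ih =>
      intro n arr
      simp only [List.foldl_cons, emitA, ih, Prod.mk.injEq]
      constructor
      · simp [List.length_cons]; omega
      · split_ifs <;> simp

lemma chunks3_nil_iff (cs : List Char) : chunks3 cs = [] ↔ cs = [] := by
  cases cs <;> rw [chunks3] <;> simp

lemma intercalate_cons₂ (sep x y : List Char) (ys : List (List Char)) :
    List.intercalate sep (x :: y :: ys) = x ++ sep ++ List.intercalate sep (y :: ys) := by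
  simp [List.intercalate, List.intersperse]

lemma emitA_flatten : ∀ (l : Nat) (cs : List Char), cs.length ≤ l → ∀ n : Nat, n % 3 = 0 →
    (emitA cs n).flatten =
      if cs = [] then []
      else (if n = 0 then ['1','1'] else ['1','1','1','1']) ++
           List.intercalate ['1','1','1','1'] (chunks3 cs) := by
  intro l
  induction l with
  | zero =>
      intro cs h n _
      have : cs = [] := by cases cs <;> simp_all
      simp [this, emitA]
  | succ l ih =>
      intro cs h n hn
      match cs with
      | [] => simp [emitA]
      | [a] =>
          rw [chunks3]
          simp [emitA, hn, chunks3, List.intercalate]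
          split_ifs <;> simp
      | [a, b] =>
          have h1 : (n + 1) % 3 ≠ 0 := by omega
          rw [chunks3]
          simp [emitA, hn, h1, chunks3, List.intercalate]
          split_ifs <;> simp
      | a :: b :: c :: rest =>
          have h1 : (n + 1) % 3 ≠ 0 := by omega
          have h2 : (n + 1 + 1) % 3 ≠ 0 := by omega
          have h3 : (n + 1 + 1 + 1) % 3 = 0 := by omega
          have h4 : n + 1 + 1 + 1 ≠ 0 := by omega
          have hlen : rest.length ≤ l := by simp at h; omega
          have ihr := ih rest hlen (n + 1 + 1 + 1) h3
          have hch : chunks3 (a :: b :: c :: rest) = [a, b, c] :: chunks3 rest := by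
            rw [chunks3]; simp
          by_cases hr : rest = []
          · subst hr
            simp [emitA, hn, h1, h2, hch, List.intercalate]
            rw [(chunks3_nil_iff []).mpr rfl]
            split_ifs <;> simp
          · rw [if_neg h4] at ihr
            rw [if_neg hr] at ihr
            obtain ⟨x, xs, hx⟩ : ∃ x xs, chunks3 rest = x :: xs := by
              cases hc : chunks3 rest with
              | nil => exact absurd ((chunks3_nil_iff rest).mp hc) hr
              | cons x xs => exact ⟨x, xs, rfl⟩
            simp only [emitA, hn, if_pos, h1, h2, ite_false]
            rw [hch, hx, intercalate_cons₂]
            rw [hx] at ihr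
            simp [ihr]
            split_ifs <;> simp

lemma bitsA_eq_maskString (cs : List Char) : bitsA cs = maskString cs := by
  unfold bitsA maskString
  rw [foldA_eq]
  by_cases h : cs = []
  · subst h; simp [emitA]
  · have := emitA_flatten cs.length cs le_rfl 0 (by omega)
    simp [h] at this
    simp [h, this]

-- taking a 24-block out of the reversed string and reversing back is a direct clamped slice of the original
lemma rev_seg_eq (s : List Char) (i : Nat) :
    ((PySem.List.slice s.reverse (some ((24 * i : Nat) : Int)) (some ((24 * i + 24 : Nat) : Int))).reverse
      : List Char) = segB s (i : Int) := by
  rw [PySem.List.slice_natCast]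
  unfold segB
  dsimp only
  have h1 : (max 0 ((s.length : Int) - 24 * ((i:Int) + 1))) = ((s.length - 24 * (i+1) : Nat) : Int) := by
    omega
  have h2 : (max 0 ((s.length : Int) - 24 * (i:Int))) = ((s.length - 24 * i : Nat) : Int) := by
    omega
  rw [h1, h2, PySem.List.slice_natCast]
  rw [List.drop_reverse, List.take_reverse, List.reverse_reverse]
  rw [List.length_take, List.drop_take]
  have e1 : min (s.length - 24 * i) s.length - (24 * i + 24 - 24 * i) = s.length - 24 * (i + 1) := by omega
  rw [e1]

-- A's per-compute chain of outer writes equals B's single outer write of the folded inner dict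
lemma foldl_pmSet (g : String → String) (key : String) :
    ∀ (sys : List String), sys ≠ [] → ∀ (cms : List (String × List (String × String))),
    sys.foldl (fun cms c => pmSet cms key c (g c)) cms
    = ((PySem.Dict.mk cms).insert key
        ((sys.foldl (fun d c => d.insert c (g c))
          (PySem.Dict.mk ((PySem.Dict.mk cms).getD key []))).items)).items := by
  intro sys
  induction sys with
  | nil => intro h; exact absurd rfl h
  | cons c rest ih =>
      intro _ cms
      rcases rest with _ | ⟨c2, rest2⟩
      · simp [List.foldl, pmSet]
      · have hne : (c2 :: rest2 : List String) ≠ [] := by simp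
        rw [List.foldl_cons, ih hne]
        have e1 : (PySem.Dict.mk (pmSet cms key c (g c))).getD key []
            = ((PySem.Dict.mk ((PySem.Dict.mk cms).getD key [])).insert c (g c)).items := by
          unfold pmSet
          exact PySem.Dict.getD_insert_self _ _ _ _
        rw [e1]
        show ((PySem.Dict.mk (pmSet cms key c (g c))).insert key
            (((c2 :: rest2).foldl (fun d c => d.insert c (g c))
              ((PySem.Dict.mk ((PySem.Dict.mk cms).getD key [])).insert c (g c))).items)).items = _
        rw [List.foldl_cons (l := rest2)]
        unfold pmSet
        congr 1
        exact PySem.Dict.insert_insert_self _ _ _ _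

theorem ports_eq (ClassMask : List (String × String)) (ClassMask_sys : List (String × List (String × String))) (syscomputes : List String)
    (hpre : ClassMask = [] ∨ syscomputes = [] ∨ (∀ c ∈ syscomputes, c = "compute0" ∨ c = "compute1" ∨ c = "compute2")) :
    pseudo_masking ClassMask ClassMask_sys syscomputes = pseudo_masking_alt ClassMask ClassMask_sys syscomputes := by
  rcases hpre with hcm | hsys | hgood
  · subst hcm; rfl
  · subst hsys
    unfold pseudo_masking pseudo_masking_alt
    simp
  · unfold pseudo_masking pseudo_masking_alt
    congr 1
    funext cms key
    dsimp only
    set s := ((PySem.Dict.mk ClassMask).getD key "").toList with hs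
    rcases hsc : syscomputes with _ | ⟨c0, cs0⟩
    · rfl
    · rw [if_neg (by simp)]
      rw [← hsc]
      have hne : syscomputes ≠ [] := by rw [hsc]; simp
      rw [foldl_pmSet _ key syscomputes hne cms]
      congr 2
      refine congrArg PySem.Dict.items (PySem.List.foldl_congr_mem' _ _ _ _ ?_)
      intro c hc acc
      congr 1
      have hval : ∀ j : Nat, j < 3 →
          bitsA ((PySem.List.slice s.reverse (some ((24 * j : Nat) : Int)) (some ((24 * j + 24 : Nat) : Int))).reverse)
            = maskString (segB s (j : Int)) := by
        intro j _
        rw [bitsA_eq_maskString, rev_seg_eq]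
      rcases hgood c hc with rfl | rfl | rfl
      · have := hval 0 (by omega)
        simpa [PySem.Dict.getD_eq_get?_getD, PySem.Dict.get?_mk_cons, PySem.List.pyRange] using this
      · have := hval 1 (by omega)
        simpa [PySem.Dict.getD_eq_get?_getD, PySem.Dict.get?_mk_cons, PySem.List.pyRange] using this
      · have := hval 2 (by omega)
        simpa [PySem.Dict.getD_eq_get?_getD, PySem.Dict.get?_mk_cons, PySem.List.pyRange] using this

-- ===== VERDICT (by name: the statement is the Claim_ definition above) =====
theorem pseudo_masking_spec : Claim_equal_pseudo_masking := by
  intro CM CMS sys _ hpre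
  unfold Spec_pseudo_masking
  refine ports_eq CM CMS sys ?_
  rcases hpre with h | h | h
  · left; exact h
  · right; left; exact h
  · right; right; exact h.1
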